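-- pv_equiv track=rewrite | github.com/pyvypr/VyPRAnalysis | utils.py | get_qualifier_subsequence
-- ===== SOURCE A (Python) =====
-- def get_qualifier_subsequence(function_qualifier):
--     """Given a fully qualified function name, iterate over it and find the file in which the function is defined (
--     this is the entry in the qualifier chain before the one that causes an import error) """
--
--     # tokenise the qualifier string so we have names and symbols
--     # the symbol used to separate two names tells us what the relationship is
--     # a/b means a is a directory and b is contained within it
--     # a.b means b is a member of a, so a is either a module or a class
--
--     tokens = []
--     last_position = 0
--     for (n, character) in enumerate(list(function_qualifier)):
--         if character in [".", "/"]: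
--             tokens.append(function_qualifier[last_position:n])
--             tokens.append(function_qualifier[n])
--             last_position = n + 1
--         elif n == len(function_qualifier) - 1:
--             tokens.append(function_qualifier[last_position:])
--
--     return tokens
-- ===== SOURCE B (Python) =====
-- def get_qualifier_subsequence(function_qualifier):
--     # One pass building the current segment char by char (no index arithmetic
--     # or slicing); flush the pending segment at the end only if non-empty,
--     # which reproduces the "no trailing token after a trailing separator" rule.
--     tokens = []
--     seg = []
--     for c in function_qualifier:
--         if c in "./":
--             tokens.append(''.join(seg))
--             tokens.append(c)
--             seg = []
--         else:
--             seg.append(c)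
--     if seg:
--         tokens.append(''.join(seg))
--     return tokens
-- ===== Notes on version B (the rewrite author's own statement) =====
-- stated objective: simpler
-- what changed: Replaces A's index bookkeeping (enumerate, last_position, index slicing, a per-character last-index test) by a single pass that accumulates the current segment's characters and flushes it once at the end if non-empty.
import Mathlib
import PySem

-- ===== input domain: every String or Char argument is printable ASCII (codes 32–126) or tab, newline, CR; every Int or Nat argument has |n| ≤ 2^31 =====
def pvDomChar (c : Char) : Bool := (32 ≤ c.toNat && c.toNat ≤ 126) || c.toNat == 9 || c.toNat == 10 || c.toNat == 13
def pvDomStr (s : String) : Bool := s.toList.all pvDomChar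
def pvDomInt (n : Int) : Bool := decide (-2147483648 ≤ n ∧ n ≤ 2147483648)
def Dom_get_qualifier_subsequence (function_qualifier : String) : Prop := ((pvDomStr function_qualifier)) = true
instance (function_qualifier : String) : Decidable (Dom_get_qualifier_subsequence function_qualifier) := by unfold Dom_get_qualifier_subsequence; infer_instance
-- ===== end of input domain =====

-- B: tokenizes by one pass with a character accumulator instead of A's enumerate/last_position/slicing bookkeeping (simpler; same output).


-- ===== PORT A =====
def get_qualifier_subsequence (function_qualifier : String) : List String :=
  let cs := function_qualifier.toList
  let st := (PySem.List.enumerate cs).foldl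
    (fun (acc : List String × Int) p =>
      if p.2 = '.' ∨ p.2 = '/' then
        (acc.1 ++ [String.ofList (PySem.List.slice cs (some acc.2) (some p.1))]
               ++ [String.ofList [p.2]], p.1 + 1)
      else if p.1 = (cs.length : Int) - 1 then
        (acc.1 ++ [String.ofList (PySem.List.slice cs (some acc.2) none)], acc.2)
      else acc)
    ([], 0)
  st.1

-- ===== PORT B =====
def get_qualifier_subsequence_alt (function_qualifier : String) : List String :=
  let st := function_qualifier.toList.foldl
    (fun (acc : List String × List Char) c =>
      if c = '.' ∨ c = '/' then
        (acc.1 ++ [String.ofList acc.2, String.ofList [c]], [])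
      else
        (acc.1, acc.2 ++ [c]))
    ([], [])
  if st.2.isEmpty then st.1 else st.1 ++ [String.ofList st.2]

-- ===== PRECONDITION & SPEC =====
def Spec_get_qualifier_subsequence (function_qualifier : String) (out : List String) : Prop := out = get_qualifier_subsequence_alt function_qualifier
instance (function_qualifier : String) (out : List String) : Decidable (Spec_get_qualifier_subsequence function_qualifier out) := by unfold Spec_get_qualifier_subsequence; infer_instance

-- ===== CLAIM (what is proved, stated in full; the proofs are below) =====
def Claim_equal_get_qualifier_subsequence : Prop := ∀ (function_qualifier : String), Dom_get_qualifier_subsequence function_qualifier → Spec_get_qualifier_subsequence function_qualifier (get_qualifier_subsequence function_qualifier)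

-- ===== LEMMAS AND PROOFS =====


-- A's fold state (tokens, last_position) over enumerate-from-k agrees with B's fold
-- state (tokens, pending segment) over the remaining characters, once B's final
-- flush of a non-empty segment is taken into account.
theorem gqs_inv (cs : List Char) (rest : List Char) (k lp : Nat) (ts : List String)
    (hlk : lp ≤ k) (hdrop : cs.drop k = rest) (hor : lp = k ∨ rest ≠ []) :
    ((PySem.List.enumerate rest (k : Int)).foldl
      (fun (acc : List String × Int) p =>
        if p.2 = '.' ∨ p.2 = '/' then
          (acc.1 ++ [String.ofList (PySem.List.slice cs (some acc.2) (some p.1))]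
                 ++ [String.ofList [p.2]], p.1 + 1)
        else if p.1 = (cs.length : Int) - 1 then
          (acc.1 ++ [String.ofList (PySem.List.slice cs (some acc.2) none)], acc.2)
        else acc)
      (ts, (lp : Int))).1
    = (let st := rest.foldl
        (fun (acc : List String × List Char) c =>
          if c = '.' ∨ c = '/' then
            (acc.1 ++ [String.ofList acc.2, String.ofList [c]], [])
          else
            (acc.1, acc.2 ++ [c]))
        (ts, (cs.drop lp).take (k - lp));
       if st.2.isEmpty then st.1 else st.1 ++ [String.ofList st.2]) := by
  induction rest generalizing k lp ts with
  | nil =>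
    rcases hor with h | h
    · subst h
      simp [PySem.List.enumerate]
    · exact absurd rfl h
  | cons c rest' ih =>
    have hlen : cs.length = k + 1 + rest'.length := by
      have := congrArg List.length hdrop
      simp at this
      omega
    have hdropseg : cs.drop lp = (cs.drop lp).take (k - lp) ++ (c :: rest') := by
      conv_lhs => rw [← List.take_append_drop (k - lp) (cs.drop lp)]
      rw [List.drop_drop]
      have : lp + (k - lp) = k := by omega
      rw [this, hdrop]
    have hseglen : ((cs.drop lp).take (k - lp)).length = k - lp := by
      simp
      omega
    have hdrop' : cs.drop (k + 1) = rest' := by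
      have : cs.drop (k + 1) = (cs.drop k).drop 1 := by
        rw [List.drop_drop]
      rw [this, hdrop]
      rfl
    rw [PySem.List.enumerate_cons]
    by_cases hc : c = '.' ∨ c = '/'
    · -- separator: both sides append the finished segment and the separator
      simp only [List.foldl_cons, if_pos hc]
      have hcast : (k : Int) + 1 = ((k + 1 : Nat) : Int) := by push_cast; ring
      rw [hcast, ih (k + 1) (k + 1)
        (ts ++ [String.ofList (PySem.List.slice cs (some (lp : Int)) (some (k : Int)))]
            ++ [String.ofList [c]]) le_rfl hdrop' (Or.inl rfl)]
      simp [PySem.List.slice_natCast]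
    · rcases eq_or_ne rest' [] with hre | hre
      · -- last character, not a separator: A slices the tail, B flushes seg ++ [c]
        subst hre
        have hk : (k : Int) = (cs.length : Int) - 1 := by
          simp at hlen
          omega
        simp only [List.foldl_cons, if_neg hc, if_pos hk]
        simp [PySem.List.enumerate, PySem.List.slice_from_natCast]
        conv_lhs => rw [hdropseg]
        simp [String.ofList_append]
      · -- middle character: both states extend the pending segment
        have hk : ¬ ((k : Int) = (cs.length : Int) - 1) := by
          have : rest'.length ≠ 0 := by simpa using hre
          omega
        simp only [List.foldl_cons, if_neg hc, if_neg hk]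
        have hcast : (k : Int) + 1 = ((k + 1 : Nat) : Int) := by push_cast; ring
        rw [hcast, ih (k + 1) lp ts (by omega) hdrop' (Or.inr hre)]
        have hseg : (cs.drop lp).take (k + 1 - lp) = (cs.drop lp).take (k - lp) ++ [c] := by
          conv_lhs => rw [hdropseg]
          rw [List.take_append, List.take_of_length_le (by rw [hseglen]; omega), hseglen]
          have h1 : k + 1 - lp - (k - lp) = 1 := by omega
          rw [h1]
          simp
        rw [hseg]

-- ===== VERDICT (by name: the statement is the Claim_ definition above) =====
theorem get_qualifier_subsequence_spec : Claim_equal_get_qualifier_subsequence := by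
  intro s _
  unfold Spec_get_qualifier_subsequence get_qualifier_subsequence get_qualifier_subsequence_alt
  simpa using gqs_inv s.toList s.toList 0 0 [] le_rfl rfl (Or.inl rfl)
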